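-- pv_equiv track=rewrite | github.com/EnigmaPlatform/key | checker.py | is_valid_key
-- ===== SOURCE A (Python) =====
-- def is_valid_key(key_hex: str) -> bool:
--     """Проверка валидности ключа"""
--     if len(key_hex) != 64:
--         return False
--
--     # Проверка префикса
--     for i in range(46):
--         if key_hex[i] != '0':
--             return False
--
--     if key_hex[46] not in {'4', '5', '6', '7'}:
--         return False
--
--     last_17 = key_hex[-17:]
--
--     # Проверка запрещенных последовательностей
--     for i in range(len(last_17) - 4):
--         if (last_17[i] == last_17[i+1] == last_17[i+2] == last_17[i+3] == last_17[i+4]):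
--             return False
--
--     return True
-- ===== SOURCE B (Python) =====
-- def is_valid_key(key_hex: str) -> bool:
--     if len(key_hex) != 64:
--         return False
--     if key_hex[:46] != '0' * 46:
--         return False
--     if key_hex[46] not in '4567':
--         return False
--     # run-length scan over the last 17 characters instead of a 5-wide window scan
--     prev = key_hex[47]
--     run = 1
--     for c in key_hex[48:]:
--         if c == prev:
--             run += 1
--             if run >= 5:
--                 return False
--         else:
--             prev = c
--             run = 1
--     return True
-- ===== Notes on version B (the rewrite author's own statement) =====
-- stated objective: alternative
-- what changed: Prefix check becomes a single slice comparison against a 46-character zero string, and the forbidden-repeat check maintains run lengths of identical consecutive characters in one pass (fail when a run reaches 5) instead of testing every fixed 5-wide window of offsets.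
import Mathlib
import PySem

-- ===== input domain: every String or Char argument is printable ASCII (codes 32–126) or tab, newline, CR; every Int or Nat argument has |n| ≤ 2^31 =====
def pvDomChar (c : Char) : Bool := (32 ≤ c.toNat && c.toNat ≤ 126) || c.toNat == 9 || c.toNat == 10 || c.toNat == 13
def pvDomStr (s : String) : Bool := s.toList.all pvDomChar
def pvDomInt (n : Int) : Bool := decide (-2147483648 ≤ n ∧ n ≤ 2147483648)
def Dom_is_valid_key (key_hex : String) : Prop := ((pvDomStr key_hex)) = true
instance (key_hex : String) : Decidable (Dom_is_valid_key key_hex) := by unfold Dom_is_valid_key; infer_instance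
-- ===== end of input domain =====

-- B replaces the 46-iteration prefix loop by one slice comparison and the 5-wide
-- sliding-window repeat scan by a single run-length pass (objective: alternative decomposition).

-- ===== PORT A =====
def is_valid_key (key_hex : String) : Bool :=
  if PySem.Str.len key_hex ≠ 64 then false
  else if (PySem.List.pyRange 0 46 1).any
      (fun i => !(PySem.List.pyGetD key_hex.toList i ' ' == '0')) then false
  else if !(PySem.List.pyGetD key_hex.toList 46 ' ' ∈ ['4', '5', '6', '7'] : Bool) then false
  else
    let last17 := PySem.List.slice key_hex.toList (some (-17)) none
    if (PySem.List.pyRange 0 ((last17.length : Int) - 4) 1).any (fun i =>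
        (PySem.List.pyGetD last17 i ' ' == PySem.List.pyGetD last17 (i+1) ' ') &&
        (PySem.List.pyGetD last17 (i+1) ' ' == PySem.List.pyGetD last17 (i+2) ' ') &&
        (PySem.List.pyGetD last17 (i+2) ' ' == PySem.List.pyGetD last17 (i+3) ' ') &&
        (PySem.List.pyGetD last17 (i+3) ' ' == PySem.List.pyGetD last17 (i+4) ' ')) then false
    else true

-- ===== PORT B =====
-- run-length scan: current run of `prev` has length `run`; fail as soon as a run reaches 5
def runScan : Char → Int → List Char → Bool
  | _, _, [] => true
  | prev, run, c :: tl =>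
    if c = prev then
      if run + 1 ≥ 5 then false else runScan prev (run + 1) tl
    else runScan c 1 tl

def is_valid_key_alt (key_hex : String) : Bool :=
  if PySem.Str.len key_hex ≠ 64 then false
  else if PySem.List.slice key_hex.toList none (some 46) ≠ List.replicate 46 '0' then false
  else if !(PySem.List.pyGetD key_hex.toList 46 ' ' ∈ ['4', '5', '6', '7'] : Bool) then false
  else
    match PySem.List.slice key_hex.toList (some 47) none with
    | [] => true
    | p :: rest => runScan p 1 rest

-- ===== PRECONDITION & SPEC =====
def Spec_is_valid_key (key_hex : String) (out : Bool) : Prop := out = is_valid_key_alt key_hex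
instance (key_hex : String) (out : Bool) : Decidable (Spec_is_valid_key key_hex out) := by unfold Spec_is_valid_key; infer_instance

-- ===== CLAIM (what is proved, stated in full; the proofs are below) =====
def Claim_equal_is_valid_key : Prop := ∀ (key_hex : String), Dom_is_valid_key key_hex → Spec_is_valid_key key_hex (is_valid_key key_hex)

-- ===== LEMMAS AND PROOFS =====

-- proof-only helper: structural 5-wide window check on a list of characters
def hasWin : List Char → Bool
  | a :: b :: c :: d :: e :: tl =>
    ((a == b) && (b == c) && (c == d) && (d == e)) || hasWin (b :: c :: d :: e :: tl)
  | _ => false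

lemma prefix_lemma (cs : List Char) (h : 46 ≤ cs.length) :
    ((List.range 46).any (fun k => !(cs.getD k ' ' == '0')) = false) ↔
      cs.take 46 = List.replicate 46 '0' := by
  rw [List.any_eq_false]
  simp only [List.mem_range, Bool.not_eq_true', beq_eq_false_iff_ne, ne_eq, not_not]
  constructor
  · intro hall
    apply List.ext_getElem
    · simp; omega
    · intro k h1 h2
      simp only [List.getElem_take, List.getElem_replicate]
      have hk : k < 46 := by simp at h1; omega
      have := hall k hk
      rwa [List.getD_eq_getElem cs ' ' (by omega)] at this
  · intro heq k hk
    rw [List.getD_eq_getElem cs ' ' (by omega)]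
    have h2 : (cs.take 46)[k]'(by simp; omega) = (List.replicate 46 '0')[k]'(by simpa using hk) :=
      List.getElem_of_eq heq _
    rw [List.getElem_take] at h2
    rw [h2, List.getElem_replicate]

lemma anyWin_eq : ∀ (t : List Char),
    (List.range (t.length - 4)).any (fun k =>
        (t.getD k ' ' == t.getD (k+1) ' ') && (t.getD (k+1) ' ' == t.getD (k+2) ' ') &&
        (t.getD (k+2) ' ' == t.getD (k+3) ' ') && (t.getD (k+3) ' ' == t.getD (k+4) ' ')) =
      hasWin t := by
  intro t
  induction t with
  | nil => rfl
  | cons a t' ih =>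
    rcases t' with _ | ⟨b, _ | ⟨c, _ | ⟨d, _ | ⟨e, tl⟩⟩⟩⟩
    · rfl
    · rfl
    · rfl
    · rfl
    · have hlen : (a :: b :: c :: d :: e :: tl).length - 4 = tl.length + 1 := by
        simp
      rw [hlen, List.range_succ_eq_map, List.any_cons, List.any_map]
      have h0 : (((a :: b :: c :: d :: e :: tl).getD 0 ' ' == (a :: b :: c :: d :: e :: tl).getD (0+1) ' ') &&
          ((a :: b :: c :: d :: e :: tl).getD (0+1) ' ' == (a :: b :: c :: d :: e :: tl).getD (0+2) ' ') &&
          ((a :: b :: c :: d :: e :: tl).getD (0+2) ' ' == (a :: b :: c :: d :: e :: tl).getD (0+3) ' ') &&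
          ((a :: b :: c :: d :: e :: tl).getD (0+3) ' ' == (a :: b :: c :: d :: e :: tl).getD (0+4) ' ')) =
          ((a == b) && (b == c) && (c == d) && (d == e)) := by
        rfl
      have hb : (b :: c :: d :: e :: tl).length - 4 = tl.length := by simp
      rw [show hasWin (a :: b :: c :: d :: e :: tl) =
        (((a == b) && (b == c) && (c == d) && (d == e)) || hasWin (b :: c :: d :: e :: tl)) from rfl]
      rw [← ih, hb]
      rw [h0]
      rfl

lemma hasWin_rep1 (p x : Char) (tl : List Char) (hq : (p == x) = false) :
    hasWin (p :: x :: tl) = hasWin (x :: tl) := by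
  rcases tl with _ | ⟨c, _ | ⟨d, _ | ⟨e, r⟩⟩⟩ <;> simp [hasWin, hq]

lemma hasWin_rep2 (p x : Char) (tl : List Char) (hq : (p == x) = false) :
    hasWin (p :: p :: x :: tl) = hasWin (x :: tl) := by
  rcases tl with _ | ⟨c, _ | ⟨d, r⟩⟩ <;> simp [hasWin, hq, hasWin_rep1 p x _ hq]

lemma hasWin_rep3 (p x : Char) (tl : List Char) (hq : (p == x) = false) :
    hasWin (p :: p :: p :: x :: tl) = hasWin (x :: tl) := by
  rcases tl with _ | ⟨c, r⟩ <;> simp [hasWin, hq, hasWin_rep2 p x _ hq]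

lemma hasWin_rep4 (p x : Char) (tl : List Char) (hq : (p == x) = false) :
    hasWin (p :: p :: p :: p :: x :: tl) = hasWin (x :: tl) := by
  simp [hasWin, hq, hasWin_rep3 p x _ hq]

lemma runScan_eq : ∀ (l : List Char) (p : Char) (n : Nat), 1 ≤ n → n ≤ 4 →
    runScan p (n : Int) l = !hasWin (List.replicate n p ++ l) := by
  intro l
  induction l with
  | nil =>
    intro p n h1 h4
    interval_cases n <;> rfl
  | cons c tl ih =>
    intro p n h1 h4
    by_cases hc : c = p
    · subst hc
      by_cases h44 : n = 4
      · subst h44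
        show runScan c 4 (c :: tl) = _
        rw [show runScan c 4 (c :: tl) = false by simp [runScan]]
        rw [show List.replicate 4 c ++ c :: tl = c :: c :: c :: c :: c :: tl by
          simp [List.replicate]]
        simp [hasWin]
      · have hlt : ¬ ((n : Int) + 1 ≥ 5) := by omega
        rw [show runScan c (n : Int) (c :: tl) = runScan c ((n : Int) + 1) tl by
          simp [runScan, hlt]]
        have : ((n : Int) + 1) = ((n + 1 : Nat) : Int) := by push_cast; ring
        rw [this, ih c (n + 1) (by omega) (by omega)]
        congr 2
        rw [List.replicate_succ']
        simp
    · have hq' : (p == c) = false := by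
        simp only [beq_eq_false_iff_ne, ne_eq]
        exact fun h => hc h.symm
      rw [show runScan p (n : Int) (c :: tl) = runScan c 1 tl by simp [runScan, hc]]
      rw [show (1 : Int) = ((1 : Nat) : Int) by norm_num, ih c 1 (by omega) (by omega)]
      rw [show List.replicate 1 c ++ tl = c :: tl by simp [List.replicate]]
      congr 1
      interval_cases n
      · simpa using (hasWin_rep1 p c tl hq').symm
      · rw [show List.replicate 2 p ++ c :: tl = p :: p :: c :: tl by simp [List.replicate]]
        exact (hasWin_rep2 p c tl hq').symm
      · rw [show List.replicate 3 p ++ c :: tl = p :: p :: p :: c :: tl by simp [List.replicate]]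
        exact (hasWin_rep3 p c tl hq').symm
      · rw [show List.replicate 4 p ++ c :: tl = p :: p :: p :: p :: c :: tl by simp [List.replicate]]
        exact (hasWin_rep4 p c tl hq').symm

-- bridge: A's indexed prefix loop, stated over List.range
lemma pyA_prefix (cs : List Char) :
    (PySem.List.pyRange 0 46 1).any (fun i => !(PySem.List.pyGetD cs i ' ' == '0')) =
    (List.range 46).any (fun k => !(cs.getD k ' ' == '0')) := by
  rw [PySem.List.pyRange_one, List.any_map,
      show (((46:Int) - 0)).toNat = 46 by decide]
  apply List.any_congr rfl
  intro k
  simp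

-- bridge: A's indexed window loop equals the structural window check
lemma pyA_rep (t : List Char) :
    (PySem.List.pyRange 0 ((t.length : Int) - 4) 1).any (fun i =>
        (PySem.List.pyGetD t i ' ' == PySem.List.pyGetD t (i+1) ' ') &&
        (PySem.List.pyGetD t (i+1) ' ' == PySem.List.pyGetD t (i+2) ' ') &&
        (PySem.List.pyGetD t (i+2) ' ' == PySem.List.pyGetD t (i+3) ' ') &&
        (PySem.List.pyGetD t (i+3) ' ' == PySem.List.pyGetD t (i+4) ' ')) = hasWin t := by
  rw [PySem.List.pyRange_one, List.any_map]
  rw [show (((t.length : Int) - 4) - 0).toNat = t.length - 4 by omega]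
  rw [← anyWin_eq t]
  apply List.any_congr rfl
  intro k
  simp only [Function.comp, zero_add]
  rw [show ((k:Int)+1) = ((k+1 : Nat):Int) by push_cast; ring,
      show ((k:Int)+2) = ((k+2 : Nat):Int) by push_cast; ring,
      show ((k:Int)+3) = ((k+3 : Nat):Int) by push_cast; ring,
      show ((k:Int)+4) = ((k+4 : Nat):Int) by push_cast; ring]
  simp only [PySem.List.pyGetD_natCast]

-- ===== VERDICT (by name: the statement is the Claim_ definition above) =====
theorem is_valid_key_spec : Claim_equal_is_valid_key := by
  intro key_hex _
  unfold Spec_is_valid_key is_valid_key is_valid_key_alt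
  by_cases hlen : PySem.Str.len key_hex ≠ 64
  · rw [if_pos hlen, if_pos hlen]
  · rw [if_neg hlen, if_neg hlen]
    simp only [ne_eq, not_not] at hlen
    have hN : key_hex.toList.length = 64 := by
      rw [PySem.Str.len_eq] at hlen
      exact_mod_cast hlen
    rw [pyA_prefix key_hex.toList]
    have hBp : PySem.List.slice key_hex.toList none (some 46) = key_hex.toList.take 46 := by
      simp [PySem.List.slice_to]
    rw [hBp]
    have hiff : ((List.range 46).any (fun k => !(key_hex.toList.getD k ' ' == '0')) = true) ↔
        (key_hex.toList.take 46 ≠ List.replicate 46 '0') := by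
      have h := (prefix_lemma key_hex.toList (by omega)).not
      simp only [Bool.not_eq_false] at h
      rw [h]
    apply if_congr hiff rfl
    apply if_congr Iff.rfl rfl
    have h17 : PySem.List.slice key_hex.toList (some (-17)) none = key_hex.toList.drop 47 := by
      rw [PySem.List.slice_from_neg_ofNat key_hex.toList 17 (by norm_num), hN]
    have h47 : PySem.List.slice key_hex.toList (some 47) none = key_hex.toList.drop 47 := by
      simp [PySem.List.slice_from]
    obtain ⟨p, rest, hdrop⟩ : ∃ p rest, key_hex.toList.drop 47 = p :: rest := by
      cases h : key_hex.toList.drop 47 with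
      | nil =>
        have h0 : (key_hex.toList.drop 47).length = 17 := by rw [List.length_drop, hN]
        rw [h] at h0
        simp at h0
      | cons p rest => exact ⟨p, rest, rfl⟩
    rw [h17, h47, hdrop]
    show (if (PySem.List.pyRange 0 (((p :: rest).length : Int) - 4) 1).any _ = true
          then false else true) = runScan p 1 rest
    rw [pyA_rep (p :: rest)]
    rw [show (1 : Int) = ((1 : Nat) : Int) by norm_num,
        runScan_eq rest p 1 (by omega) (by omega)]
    rw [show List.replicate 1 p ++ rest = p :: rest by simp [List.replicate]]
    cases hasWin (p :: rest) <;> rfl
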